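-- pv_equiv track=rewrite | github.com/rolfwalker71-commits/monitoring | server/receiver.py | unique_mountpoints
-- ===== SOURCE A (Python) =====
-- def normalize_mountpoint_for_visibility(value: object) -> str:
--     mountpoint = str(value or "").strip()
--     if not mountpoint:
--         return ""
--     return mountpoint[:512]
--
-- def unique_mountpoints(values: list[object]) -> list[str]:
--     result: list[str] = []
--     seen: set[str] = set()
--     for value in values:
--         mountpoint = normalize_mountpoint_for_visibility(value)
--         if not mountpoint:
--             continue
--         key = mountpoint.lower()
--         if key in seen:
--             continue
--         seen.add(key)
--         result.append(mountpoint)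
--     result.sort(key=lambda item: item.lower())
--     return result
-- ===== SOURCE B (Python) =====
-- def normalize_mountpoint_for_visibility(value: object) -> str:
--     mountpoint = str(value or "").strip()
--     if not mountpoint:
--         return ""
--     return mountpoint[:512]
--
-- def unique_mountpoints(values: list[object]) -> list[str]:
--     normalized = [m for m in (normalize_mountpoint_for_visibility(v) for v in values) if m]
--     normalized.sort(key=str.lower)
--     result: list[str] = []
--     prev = None
--     for m in normalized:
--         key = m.lower()
--         if key != prev:
--             result.append(m)
--             prev = key
--     return result
-- ===== Notes on version B (the rewrite author's own statement) =====
-- stated objective: alternative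
-- what changed: A dedups first occurrences with a seen-set while scanning, then sorts; B normalizes and filters, stably sorts by lowercase key, and dedups in one adjacent-key forward pass with no set at all (stability makes the kept element A's first-seen one).
import Mathlib
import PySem

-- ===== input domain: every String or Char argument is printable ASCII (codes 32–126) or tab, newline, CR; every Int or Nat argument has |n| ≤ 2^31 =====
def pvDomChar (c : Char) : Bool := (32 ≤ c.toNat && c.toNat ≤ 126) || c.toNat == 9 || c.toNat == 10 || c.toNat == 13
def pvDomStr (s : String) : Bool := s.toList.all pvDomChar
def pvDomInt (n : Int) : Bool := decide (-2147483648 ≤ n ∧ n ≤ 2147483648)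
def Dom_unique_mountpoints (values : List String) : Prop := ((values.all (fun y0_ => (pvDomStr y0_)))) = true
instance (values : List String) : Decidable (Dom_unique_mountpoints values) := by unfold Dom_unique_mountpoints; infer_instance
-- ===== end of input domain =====

-- B replaces A's seen-set dedup-then-sort by a stable sort followed by one adjacent-key dedup pass (objective: alternative).

-- ===== PORT A =====
-- str(value or "") on a String argument is the value itself
def normalize_mountpoint_for_visibility (value : String) : String :=
  let mountpoint := PySem.Str.strip value
  if mountpoint = "" then ""
  else PySem.Str.slice mountpoint none (some 512)

def uniqueLoopA (vs : List String) (result : List String) (seen : PySem.Set String) : List String :=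
  match vs with
  | [] => result
  | value :: rest =>
    let mountpoint := normalize_mountpoint_for_visibility value
    if mountpoint = "" then uniqueLoopA rest result seen
    else
      let key := PySem.Str.lower mountpoint
      if PySem.Set.contains seen key then uniqueLoopA rest result seen
      else uniqueLoopA rest (result ++ [mountpoint]) (PySem.Set.add seen key)

def unique_mountpoints (values : List String) : List String :=
  PySem.List.sorted (uniqueLoopA values [] PySem.Set.empty) (fun item => PySem.Str.lower item) false

-- ===== PORT B =====
def unique_mountpoints_alt (values : List String) : List String :=
  let normalized := (values.map normalize_mountpoint_for_visibility).filter (fun m => m != "")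
  let sortedList := PySem.List.sorted normalized (fun m => PySem.Str.lower m) false
  (sortedList.foldl
    (fun (acc : List String × Option String) m =>
      let key := PySem.Str.lower m
      if acc.2 = some key then acc else (acc.1 ++ [m], some key))
    ([], none)).1

-- ===== PRECONDITION & SPEC =====
def Spec_unique_mountpoints (values : List String) (out : List String) : Prop := out = unique_mountpoints_alt values
instance (values : List String) (out : List String) : Decidable (Spec_unique_mountpoints values out) := by unfold Spec_unique_mountpoints; infer_instance

-- ===== CLAIM (what is proved, stated in full; the proofs are below) =====
def Claim_equal_unique_mountpoints : Prop := ∀ (values : List String), Dom_unique_mountpoints values → Spec_unique_mountpoints values (unique_mountpoints values)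

-- ===== LEMMAS AND PROOFS =====

-- model of A's loop: first-occurrence dedup by key, seen keys carried as a PySem.Set
def dedupFirst (key : String → String) (seen : PySem.Set String) : List String → List String
  | [] => []
  | m :: xs =>
    if PySem.Set.contains seen (key m) then dedupFirst key seen xs
    else m :: dedupFirst key (PySem.Set.add seen (key m)) xs

-- model of B's pass: adjacent dedup by key, previous kept key carried along
def adjDedup {α κ : Type} [DecidableEq κ] (key : α → κ) : List α → Option κ → List α
  | [], _ => []
  | m :: xs, p => if p = some (key m) then adjDedup key xs p else m :: adjDedup key xs (some (key m))

theorem uniqueLoopA_eq (vs : List String) (result : List String) (seen : PySem.Set String) :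
    uniqueLoopA vs result seen =
      result ++ dedupFirst (fun m => PySem.Str.lower m) seen
        ((vs.map normalize_mountpoint_for_visibility).filter (fun m => m != "")) := by
  induction vs generalizing result seen with
  | nil => simp [uniqueLoopA, dedupFirst]
  | cons v rest ih =>
    by_cases hm : normalize_mountpoint_for_visibility v = ""
    · simp [uniqueLoopA, hm, ih]
    · by_cases hs : PySem.Str.lower (normalize_mountpoint_for_visibility v) ∈ seen
      · simp [uniqueLoopA, hm, hs, ih, dedupFirst]
      · simp [uniqueLoopA, hm, hs, ih, dedupFirst]

theorem foldB_eq {α κ : Type} [DecidableEq κ] (key : α → κ) (xs : List α) (acc : List α) (p : Option κ) :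
    (xs.foldl
      (fun (acc : List α × Option κ) m =>
        if acc.2 = some (key m) then acc else (acc.1 ++ [m], some (key m)))
      (acc, p)).1 = acc ++ adjDedup key xs p := by
  induction xs generalizing acc p with
  | nil => simp [adjDedup]
  | cons m xs ih =>
    by_cases h : p = some (key m)
    · simp [adjDedup, h, ih]
    · simp [adjDedup, h, ih]

theorem dedupFirst_append (key : String → String) (seen : PySem.Set String) (L : List String) (x : String) :
    dedupFirst key seen (L ++ [x]) =
      dedupFirst key seen L ++
        (if (key x ∈ seen ∨ key x ∈ L.map key) then [] else [x]) := by
  induction L generalizing seen with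
  | nil =>
    by_cases h : key x ∈ seen
    · simp [dedupFirst, h]
    · simp [dedupFirst, h]
  | cons m L ih =>
    by_cases hs : key m ∈ seen
    · have hcond : (key x ∈ seen ∨ key x ∈ (m :: L).map key) ↔ (key x ∈ seen ∨ key x ∈ L.map key) := by
        simp only [List.map_cons, List.mem_cons]
        constructor
        · rintro (h | h | h)
          · exact Or.inl h
          · exact Or.inl (h ▸ hs)
          · exact Or.inr h
        · tauto
      simp only [List.cons_append, dedupFirst, PySem.Set.contains_iff, hs, if_true, ih, hcond]
    · have hcond : (key x ∈ PySem.Set.add seen (key m) ∨ key x ∈ L.map key) ↔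
          (key x ∈ seen ∨ key x ∈ (m :: L).map key) := by
        rw [PySem.Set.mem_add]
        simp only [List.map_cons, List.mem_cons]
        tauto
      have hsb : PySem.Set.contains seen (key m) = false := by
        rw [← Bool.not_eq_true, PySem.Set.contains_iff]; exact hs
      simp only [List.cons_append, dedupFirst, hsb, Bool.false_eq_true, if_false, ih, hcond,
        List.cons_append]

theorem insertBy_front {α κ : Type} [LinearOrder κ] (key : α → κ) (x : α) (ys : List α)
    (h : ∀ z ∈ ys, key x < key z) :
    PySem.List.insertBy (fun a b => decide (key a < key b)) x ys = x :: ys := by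
  cases ys with
  | nil => rfl
  | cons z zs => simp [PySem.List.insertBy, h z (List.mem_cons_self ..)]

theorem adj_insert_mem {α κ : Type} [LinearOrder κ] (key : α → κ) (x : α) (s : List α)
    (hp : s.Pairwise (fun a b => key a ≤ key b)) (hmem : key x ∈ s.map key) (p : Option κ) :
    adjDedup key (PySem.List.insertBy (fun a b => decide (key a < key b)) x s) p = adjDedup key s p := by
  induction s generalizing p with
  | nil => simp at hmem
  | cons y ys ih =>
    have hyle : ∀ z ∈ ys, key y ≤ key z := fun z hz => (List.pairwise_cons.1 hp).1 z hz
    have hys : ys.Pairwise (fun a b => key a ≤ key b) := (List.pairwise_cons.1 hp).2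
    have hyx : key y ≤ key x := by
      rcases List.mem_cons.1 hmem with h | h
      · exact le_of_eq h.symm
      · rcases List.mem_map.1 h with ⟨z, hz, hkz⟩
        exact hkz ▸ hyle z hz
    have hnotlt : ¬ (key x < key y) := not_lt.2 hyx
    simp only [PySem.List.insertBy, hnotlt, decide_false, Bool.false_eq_true, if_false]
    by_cases hin : key x ∈ ys.map key
    · simp only [adjDedup]
      by_cases hpy : p = some (key y)
      · simp [hpy, ih hys hin]
      · simp [hpy, ih hys hin]
    · have hxy : key x = key y := by
        rcases List.mem_cons.1 hmem with h | h
        · exact h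
        · exact absurd h hin
      have hfront : PySem.List.insertBy (fun a b => decide (key a < key b)) x ys = x :: ys := by
        apply insertBy_front
        intro z hz
        rcases lt_or_eq_of_le (hxy ▸ hyle z hz) with h | h
        · exact h
        · exact absurd (List.mem_map.2 ⟨z, hz, h.symm⟩) hin
      rw [hfront]
      simp only [adjDedup]
      by_cases hpy : p = some (key y)
      · simp [hpy, hxy]
      · simp [hpy, hxy]

theorem adj_insert_fresh {α κ : Type} [LinearOrder κ] (key : α → κ) (x : α) (s : List α)
    (hp : s.Pairwise (fun a b => key a ≤ key b)) (hmem : key x ∉ s.map key) (p : Option κ)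
    (hpre : ∀ c, p = some c → c < key x) :
    adjDedup key (PySem.List.insertBy (fun a b => decide (key a < key b)) x s) p =
      PySem.List.insertBy (fun a b => decide (key a < key b)) x (adjDedup key s p) := by
  induction s generalizing p with
  | nil =>
    have hne : p ≠ some (key x) := fun h => absurd (hpre _ h) (lt_irrefl _)
    simp [PySem.List.insertBy, adjDedup, hne]
  | cons y ys ih =>
    have hys : ys.Pairwise (fun a b => key a ≤ key b) := (List.pairwise_cons.1 hp).2
    have hxny : key x ≠ key y := fun h => hmem (List.mem_map.2 ⟨y, List.mem_cons_self .., h.symm⟩)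
    have hmys : key x ∉ ys.map key := fun h => hmem (by simp only [List.map_cons, List.mem_cons]; exact Or.inr h)
    by_cases hlt : key x < key y
    · have hpx : p ≠ some (key x) := fun h => absurd (hpre _ h) (lt_irrefl _)
      have hpy : p ≠ some (key y) := fun h => absurd (hpre _ h) (not_lt.2 (le_of_lt hlt))
      simp only [PySem.List.insertBy, hlt, decide_true, if_true]
      simp [adjDedup, hpx, hpy, hxny, PySem.List.insertBy, hlt]
    · have hylt : key y < key x := lt_of_le_of_ne (not_lt.1 hlt) (fun h => hxny h.symm)
      simp only [PySem.List.insertBy, hlt, decide_false, Bool.false_eq_true, if_false]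
      by_cases hpy : p = some (key y)
      · simp only [adjDedup, hpy, if_true]
        rw [← hpy]
        exact ih hys hmys p hpre
      · simp only [adjDedup, hpy, if_false]
        rw [ih hys hmys (some (key y)) (by intro c hc; exact (Option.some_inj.1 hc) ▸ hylt)]
        simp [PySem.List.insertBy, hlt]

theorem sorted_append_singleton (key : String → String) (L : List String) (x : String) :
    PySem.List.sorted (L ++ [x]) key false =
      PySem.List.insertBy (fun a b => decide (key a < key b)) x (PySem.List.sorted L key false) := by
  rw [PySem.List.sorted_eq_foldl_insertBy, PySem.List.sorted_eq_foldl_insertBy, List.foldl_append]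
  rfl

theorem main_lemma (key : String → String) (L : List String) :
    adjDedup key (PySem.List.sorted L key false) none =
      PySem.List.sorted (dedupFirst key PySem.Set.empty L) key false := by
  induction L using List.reverseRecOn with
  | nil => simp [adjDedup, dedupFirst, PySem.List.sorted]
  | append_singleton L x ih =>
    have hperm : (PySem.List.sorted L key false).Perm L := PySem.List.sorted_perm ..
    have hmapmem : (key x ∈ (PySem.List.sorted L key false).map key) ↔ key x ∈ L.map key :=
      (hperm.map key).mem_iff
    have hpair : (PySem.List.sorted L key false).Pairwise (fun a b => key a ≤ key b) :=
      PySem.List.sorted_pairwise ..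
    rw [sorted_append_singleton, dedupFirst_append]
    by_cases hmem : key x ∈ L.map key
    · have hc : (key x ∈ (PySem.Set.empty : PySem.Set String) ∨ key x ∈ L.map key) := Or.inr hmem
      rw [if_pos hc, List.append_nil,
        adj_insert_mem key x _ hpair (hmapmem.2 hmem) none, ih]
    · have hninset : ¬ (key x ∈ (PySem.Set.empty : PySem.Set String) ∨ key x ∈ L.map key) := by
        rintro (h | h)
        · simp [PySem.Set.empty] at h
        · exact hmem h
      rw [if_neg hninset,
        adj_insert_fresh key x _ hpair (fun h => hmem (hmapmem.1 h)) none (by intro c hc; cases hc),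
        ih, sorted_append_singleton]

-- ===== VERDICT (by name: the statement is the Claim_ definition above) =====
theorem unique_mountpoints_spec : Claim_equal_unique_mountpoints := by
  intro values _
  unfold Spec_unique_mountpoints unique_mountpoints unique_mountpoints_alt
  rw [uniqueLoopA_eq, List.nil_append, foldB_eq, List.nil_append, main_lemma]
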